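-- pv_equiv track=rewrite | github.com/EmilianoGermani/ia-uncuyo-2025 | tp3-algoritmos-busqueda/code/frozenlake_busqueda.py | busqueda_anchura
-- ===== SOURCE A (Python) =====
-- def vecinos(pos, mapa):
--     size = len(mapa)
--     r, c = pos
--     posibles = [(r-1, c), (r+1, c), (r, c-1), (r, c+1)]
--     return [(nr, nc) for nr, nc in posibles if 0 <= nr < size and 0 <= nc < size and mapa[nr][nc] != 'H']
--
-- def busqueda_anchura(mapa, inicio, objetivo):
--     cola = [(inicio, [inicio])]
--     visitados = set([inicio])
--     expandidos = 0
--     while cola: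
--         estado, camino = cola.pop(0)
--         expandidos += 1
--         if estado == objetivo:
--             return camino, expandidos
--         for v in vecinos(estado, mapa):
--             if v not in visitados:
--                 visitados.add(v)
--                 cola.append((v, camino+[v]))
--     return None, expandidos
-- ===== SOURCE B (Python) =====
-- def busqueda_anchura(mapa, inicio, objetivo):
--     size = len(mapa)
--     queue = [inicio]
--     parents = {inicio: None}
--     head = 0
--     while head < len(queue):
--         estado = queue[head]
--         head += 1
--         if estado == objetivo:
--             camino = []
--             cur = estado
--             while cur is not None:
--                 camino.append(cur)
--                 cur = parents[cur]
--             camino.reverse()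
--             return camino, head
--         r, c = estado
--         for v in ((r - 1, c), (r + 1, c), (r, c - 1), (r, c + 1)):
--             nr, nc = v
--             if 0 <= nr < size and 0 <= nc < size and mapa[nr][nc] != 'H' and v not in parents:
--                 parents[v] = estado
--                 queue.append(v)
--     return None, head
-- ===== Notes on version B (the rewrite author's own statement) =====
-- stated objective: alternative
-- what changed: Replaces the list.pop(0) queue carrying a full copied path per node with a head-index queue plus a parent-pointer dict, reconstructing the path once at the goal; same result, different data structures and traversal bookkeeping.
import Mathlib
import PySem

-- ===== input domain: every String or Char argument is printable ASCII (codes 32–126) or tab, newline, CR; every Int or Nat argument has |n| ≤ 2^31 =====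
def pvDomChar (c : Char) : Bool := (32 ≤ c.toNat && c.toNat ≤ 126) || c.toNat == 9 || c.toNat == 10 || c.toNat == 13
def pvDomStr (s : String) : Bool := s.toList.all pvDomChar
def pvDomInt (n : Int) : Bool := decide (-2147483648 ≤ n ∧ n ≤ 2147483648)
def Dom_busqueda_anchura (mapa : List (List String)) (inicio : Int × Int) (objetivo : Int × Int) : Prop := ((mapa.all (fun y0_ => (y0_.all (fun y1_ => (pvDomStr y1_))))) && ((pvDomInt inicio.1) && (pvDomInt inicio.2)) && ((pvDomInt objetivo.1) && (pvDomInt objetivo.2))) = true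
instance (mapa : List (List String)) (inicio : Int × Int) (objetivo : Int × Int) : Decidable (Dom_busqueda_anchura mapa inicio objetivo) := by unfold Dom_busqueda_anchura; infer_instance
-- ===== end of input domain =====

-- B replaces A's list.pop(0) queue with copied paths by a head-index queue with parent
-- pointers and a single path reconstruction at the goal (objective: alternative).

-- ===== PORT A =====
-- mapa[nr][nc]: exact under Pre_ (every row at least as long as the map), where both indices
-- are in range; outside Pre_ the Python raises IndexError and nothing is claimed.
def pvCell (mapa : List (List String)) (nr nc : Int) : String :=
  ((PySem.List.pyGet? mapa nr).bind fun row => PySem.List.pyGet? row nc).getD ""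

-- the guard '0 <= nr < size and 0 <= nc < size and mapa[nr][nc] != 'H'' (verbatim in both Pythons)
def pvEsLibre (mapa : List (List String)) (v : Int × Int) : Bool :=
  decide (0 ≤ v.1) && decide (v.1 < (mapa.length : Int)) &&
  decide (0 ≤ v.2) && decide (v.2 < (mapa.length : Int)) && (pvCell mapa v.1 v.2 != "H")

def vecinos (pos : Int × Int) (mapa : List (List String)) : List (Int × Int) :=
  [(pos.1 - 1, pos.2), (pos.1 + 1, pos.2), (pos.1, pos.2 - 1), (pos.1, pos.2 + 1)].filter
    (pvEsLibre mapa)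

-- the 'while cola:' loop; the fuel mapa.length² + 2 bounds the number of pops (each popped
-- state was enqueued exactly once, and at most size² distinct cells plus inicio are enqueued),
-- so the fuel-0 guard is never reached
def pvLoopA (mapa : List (List String)) (objetivo : Int × Int) :
    Nat → List ((Int × Int) × List (Int × Int)) → PySem.Set (Int × Int) → Int →
    (Option (List (Int × Int))) × Int
  | 0, _, _, expandidos => (none, expandidos)
  | _ + 1, [], _, expandidos => (none, expandidos)
  | fuel + 1, (estado, camino) :: cola, visitados, expandidos =>
    if estado = objetivo then (some camino, expandidos + 1)
    else
      let st := (vecinos estado mapa).foldl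
        (fun (st : List ((Int × Int) × List (Int × Int)) × PySem.Set (Int × Int)) v =>
          if PySem.Set.contains st.2 v then st
          else (st.1 ++ [(v, camino ++ [v])], PySem.Set.add st.2 v)) (cola, visitados)
      pvLoopA mapa objetivo fuel st.1 st.2 (expandidos + 1)

def busqueda_anchura (mapa : List (List String)) (inicio : Int × Int) (objetivo : Int × Int) :
    (Option (List (Int × Int))) × Int :=
  pvLoopA mapa objetivo (mapa.length * mapa.length + 2)
    [(inicio, [inicio])] (PySem.Set.ofList [inicio]) 0

-- ===== PORT B =====
-- 'while cur is not None: camino.append(cur); cur = parents[cur]'; parent chains are acyclic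
-- and all their keys are present, so fuel parents.items.length + 1 suffices and the
-- KeyError branch (get? = none, stop) is never reached
def pvChainB (parents : PySem.Dict (Int × Int) (Option (Int × Int))) :
    Nat → Option (Int × Int) → List (Int × Int) → List (Int × Int)
  | 0, _, camino => camino
  | _ + 1, none, camino => camino
  | fuel + 1, some cur, camino =>
    pvChainB parents fuel ((parents.get? cur).join) (camino ++ [cur])

-- 'while head < len(queue):'; same fuel bound (= number of pops) as in A's port
def pvLoopB (mapa : List (List String)) (objetivo : Int × Int) :
    Nat → List (Int × Int) → PySem.Dict (Int × Int) (Option (Int × Int)) → Int →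
    (Option (List (Int × Int))) × Int
  | 0, _, _, head => (none, head)
  | fuel + 1, queue, parents, head =>
    if head < (queue.length : Int) then
      -- queue[head]: in range, guarded by head < len(queue)
      let estado := (PySem.List.pyGet? queue head).getD (0, 0)
      if estado = objetivo then
        (some ((pvChainB parents (parents.items.length + 1) (some estado) []).reverse), head + 1)
      else
        let st := [(estado.1 - 1, estado.2), (estado.1 + 1, estado.2),
                   (estado.1, estado.2 - 1), (estado.1, estado.2 + 1)].foldl
          (fun (st : List (Int × Int) × PySem.Dict (Int × Int) (Option (Int × Int))) v =>
            if pvEsLibre mapa v && !(st.2.contains v)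
            then (st.1 ++ [v], st.2.insert v (some estado)) else st) (queue, parents)
        pvLoopB mapa objetivo fuel st.1 st.2 (head + 1)
    else (none, head)

def busqueda_anchura_alt (mapa : List (List String)) (inicio : Int × Int) (objetivo : Int × Int) :
    (Option (List (Int × Int))) × Int :=
  pvLoopB mapa objetivo (mapa.length * mapa.length + 2)
    [inicio] (PySem.Dict.ofList [(inicio, none)]) 0

-- ===== PRECONDITION & SPEC =====
-- The probe mapa[nr][nc] (0 ≤ nr, nc < len(mapa)) can raise IndexError in A on maps with a
-- row shorter than the number of rows; Pre_ admits such maps only when A provably probes no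
-- cell at all (inicio equals objetivo, or inicio has no in-bounds neighbour). This is still
-- slightly narrower than the exact no-crash set: on a few ragged maps the search returns
-- without ever reaching a short row (see the cite in claim.json).
def Pre_busqueda_anchura (mapa : List (List String)) (inicio : Int × Int) (objetivo : Int × Int) : Prop :=
  (∀ row ∈ mapa, mapa.length ≤ row.length) ∨ inicio = objetivo ∨
  (∀ v ∈ [(inicio.1 - 1, inicio.2), (inicio.1 + 1, inicio.2),
          (inicio.1, inicio.2 - 1), (inicio.1, inicio.2 + 1)],
    ¬ (0 ≤ v.1 ∧ v.1 < (mapa.length : Int) ∧ 0 ≤ v.2 ∧ v.2 < (mapa.length : Int)))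
instance (mapa : List (List String)) (inicio : Int × Int) (objetivo : Int × Int) : Decidable (Pre_busqueda_anchura mapa inicio objetivo) := by unfold Pre_busqueda_anchura; infer_instance

def pvWitness_busqueda_anchura : List (List String) × (Int × Int) × (Int × Int) :=
  ([["F", "H"], ["F", "G"]], (0, 0), (1, 1))

def Spec_busqueda_anchura (mapa : List (List String)) (inicio : Int × Int) (objetivo : Int × Int) (out : (Option (List (Int × Int))) × Int) : Prop := out = busqueda_anchura_alt mapa inicio objetivo
instance (mapa : List (List String)) (inicio : Int × Int) (objetivo : Int × Int) (out : (Option (List (Int × Int))) × Int) : Decidable (Spec_busqueda_anchura mapa inicio objetivo out) := by unfold Spec_busqueda_anchura; infer_instance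

-- ===== CLAIM (what is proved, stated in full; the proofs are below) =====
def Claim_equal_busqueda_anchura : Prop := ∀ (mapa : List (List String)) (inicio : Int × Int) (objetivo : Int × Int), Dom_busqueda_anchura mapa inicio objetivo → Pre_busqueda_anchura mapa inicio objetivo → Spec_busqueda_anchura mapa inicio objetivo (busqueda_anchura mapa inicio objetivo)

-- ===== LEMMAS AND PROOFS =====

-- the reversed path q = [s, parent s, …, start] read off the parent dict
def pvChainRev (parents : PySem.Dict (Int × Int) (Option (Int × Int))) :
    List (Int × Int) → Prop
  | [] => False
  | [x] => parents.get? x = some none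
  | x :: y :: rest => parents.get? x = some (some y) ∧ pvChainRev parents (y :: rest)

-- the queue entry (s, p) of A is coherent with B's parent dict
def pvEntry (parents : PySem.Dict (Int × Int) (Option (Int × Int)))
    (sp : (Int × Int) × List (Int × Int)) : Prop :=
  sp.2.reverse.head? = some sp.1 ∧ sp.2.Nodup ∧ pvChainRev parents sp.2.reverse

lemma pvMemKeys (d : PySem.Dict (Int × Int) (Option (Int × Int))) (k : Int × Int)
    (v : Option (Int × Int)) (h : d.get? k = some v) : k ∈ d.keys :=
  (PySem.Dict.contains_iff_mem_keys d k).mp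
    (by rw [PySem.Dict.contains_eq_isSome_get?, h]; rfl)

lemma pvChainRev_mem (parents : PySem.Dict (Int × Int) (Option (Int × Int)))
    (q : List (Int × Int)) (h : pvChainRev parents q) : ∀ x ∈ q, x ∈ parents.keys := by
  induction q with
  | nil => exact fun x hx => absurd hx (List.not_mem_nil)
  | cons x q ih =>
    intro z hz
    match q, h with
    | [], h =>
      rcases List.mem_singleton.mp hz with rfl
      exact pvMemKeys parents z none h
    | y :: rest, ⟨h1, h2⟩ =>
      rcases List.mem_cons.mp hz with rfl | hz
      · exact pvMemKeys parents z _ h1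
      · exact ih h2 z hz

lemma pvChainRev_insert (parents : PySem.Dict (Int × Int) (Option (Int × Int)))
    (q : List (Int × Int)) (v : Int × Int) (w : Option (Int × Int))
    (hv : v ∉ parents.keys) (h : pvChainRev parents q) :
    pvChainRev (parents.insert v w) q := by
  induction q with
  | nil => exact h
  | cons x q ih =>
    match q, h with
    | [], h =>
      show (parents.insert v w).get? x = some none
      rw [PySem.Dict.get?_insert_of_ne]
      · exact h
      · rintro rfl
        exact hv (pvMemKeys _ _ none h)
    | y :: rest, ⟨h1, h2⟩ =>
      refine ⟨?_, ih h2⟩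
      rw [PySem.Dict.get?_insert_of_ne]
      · exact h1
      · rintro rfl
        exact hv (pvMemKeys _ _ _ h1)

lemma pvChainB_eval (parents : PySem.Dict (Int × Int) (Option (Int × Int)))
    (x : Int × Int) (q : List (Int × Int)) (h : pvChainRev parents (x :: q)) :
    ∀ (acc : List (Int × Int)) (f : Nat), q.length + 1 ≤ f →
      pvChainB parents f (some x) acc = acc ++ (x :: q) := by
  induction q generalizing x with
  | nil =>
    intro acc2 f hf
    match f, hf with
    | f + 1, _ =>
      show pvChainB parents f ((parents.get? x).join) (acc2 ++ [x]) = acc2 ++ [x]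
      rw [show parents.get? x = some none from h]
      show pvChainB parents f none (acc2 ++ [x]) = acc2 ++ [x]
      cases f <;> rfl
  | cons y rest ih =>
    intro acc2 f hf
    match f, hf with
    | f + 1, hf =>
      show pvChainB parents f ((parents.get? x).join) (acc2 ++ [x]) = acc2 ++ (x :: y :: rest)
      rw [show parents.get? x = some (some y) from h.1]
      show pvChainB parents f (some y) (acc2 ++ [x]) = acc2 ++ (x :: y :: rest)
      rw [ih y h.2 (acc2 ++ [x]) f (by simp only [List.length_cons] at hf ⊢; omega)]
      simp

-- inner for-loop: A's fold over the filtered neighbour list and B's fold over the raw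
-- 4-element list preserve the coupling invariant
lemma pvFold_pres (mapa : List (List String)) (s : Int × Int) (p : List (Int × Int))
    (nbrs : List (Int × Int)) :
    ∀ (colaA : List ((Int × Int) × List (Int × Int))) (vis : PySem.Set (Int × Int))
      (queue : List (Int × Int)) (parents : PySem.Dict (Int × Int) (Option (Int × Int)))
      (K : Nat),
      K ≤ queue.length →
      colaA.map Prod.fst = queue.drop K →
      vis = parents.keys →
      parents.keys.Nodup →
      (∀ sp ∈ colaA, pvEntry parents sp) →
      pvEntry parents (s, p) →
      (let stA := nbrs.foldl
        (fun (st : List ((Int × Int) × List (Int × Int)) × PySem.Set (Int × Int)) v =>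
          if pvEsLibre mapa v then
            (if PySem.Set.contains st.2 v then st
             else (st.1 ++ [(v, p ++ [v])], PySem.Set.add st.2 v))
          else st) (colaA, vis)
       let stB := nbrs.foldl
        (fun (st : List (Int × Int) × PySem.Dict (Int × Int) (Option (Int × Int))) v =>
          if pvEsLibre mapa v && !(st.2.contains v)
          then (st.1 ++ [v], st.2.insert v (some s)) else st) (queue, parents)
       K ≤ stB.1.length ∧ stA.1.map Prod.fst = stB.1.drop K ∧ stA.2 = stB.2.keys ∧
       stB.2.keys.Nodup ∧ (∀ sp ∈ stA.1, pvEntry stB.2 sp) ∧ pvEntry stB.2 (s, p)) := by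
  induction nbrs with
  | nil =>
    intro colaA vis queue parents K hK hdrop hkeys hnd hent hsp
    exact ⟨hK, hdrop, hkeys, hnd, hent, hsp⟩
  | cons v ns ih =>
    intro colaA vis queue parents K hK hdrop hkeys hnd hent hsp
    simp only [List.foldl_cons]
    by_cases hb : pvEsLibre mapa v = true
    · by_cases hc : v ∈ parents.keys
      · have hcA : PySem.Set.contains vis v = true := by
          rw [hkeys]; exact (PySem.Set.contains_iff _ _).mpr hc
        have hcB : parents.contains v = true := (PySem.Dict.contains_iff_mem_keys _ _).mpr hc
        rw [if_pos hb, if_pos hcA,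
          show (pvEsLibre mapa v && !parents.contains v) = false by rw [hb, hcB]; rfl,
          if_neg (by simp)]
        exact ih colaA vis queue parents K hK hdrop hkeys hnd hent hsp
      · have hcA : ¬ PySem.Set.contains vis v = true := by
          rw [hkeys]; simpa [PySem.Set.contains_iff] using hc
        have hcB : parents.contains v = false := by
          rcases h' : parents.contains v with _ | _
          · rfl
          · exact absurd ((PySem.Dict.contains_iff_mem_keys _ _).mp h') hc
        rw [if_pos hb, if_neg hcA,
          show (pvEsLibre mapa v && !parents.contains v) = true by rw [hb, hcB]; rfl,
          if_pos rfl]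
        -- the fresh push: both sides append v
        obtain ⟨hsp1, hsp2, hsp3⟩ := hsp
        have hvp : v ∉ p := fun hv => hc
          (pvChainRev_mem parents p.reverse hsp3 v (List.mem_reverse.mpr hv))
        obtain ⟨t, ht⟩ : ∃ t, p.reverse = s :: t := by
          cases hpr : p.reverse with
          | nil => rw [hpr] at hsp1; simp at hsp1
          | cons a t => rw [hpr] at hsp1; simp at hsp1; exact ⟨t, by rw [hsp1]⟩
        refine ih _ _ _ _ K (by simp; omega) ?_ ?_
          (PySem.Dict.nodup_keys_insert _ _ _ hnd) ?_ ?_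
        · simp only [List.map_append, List.map_cons, List.map_nil, hdrop,
            List.drop_append_of_le_length hK]
        · rw [PySem.Set.add_of_not_mem (by rw [hkeys]; exact hc), hkeys,
            PySem.Dict.keys_insert_of_not_contains _ _ hcB]
        · intro sp hsm
          rcases List.mem_append.mp hsm with hsm | hsm
          · obtain ⟨e1, e2, e3⟩ := hent sp hsm
            exact ⟨e1, e2, pvChainRev_insert _ _ _ _ hc e3⟩
          · rcases List.mem_singleton.mp hsm with rfl
            refine ⟨by simp, ?_, ?_⟩
            · simp only [List.nodup_append, List.nodup_singleton, true_and, hsp2]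
              intro a ha b hb
              rcases List.mem_singleton.mp hb with rfl
              exact fun h => hvp (h ▸ ha)
            · show pvChainRev _ ((p ++ [v]).reverse)
              rw [List.reverse_append, List.reverse_singleton, List.singleton_append, ht]
              exact ⟨PySem.Dict.get?_insert_self _ _ _,
                pvChainRev_insert _ _ _ _ hc (ht ▸ hsp3)⟩
        · refine ⟨hsp1, hsp2, pvChainRev_insert _ _ _ _ hc hsp3⟩
    · rw [if_neg hb, show (pvEsLibre mapa v && !parents.contains v) = false by
        simp only [Bool.not_eq_true] at hb; rw [hb]; rfl, if_neg (by simp)]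
      exact ih colaA vis queue parents K hK hdrop hkeys hnd hent hsp

-- main loop coupling
lemma pvLoop_eq (mapa : List (List String)) (objetivo : Int × Int) (fuel : Nat) :
    ∀ (cola : List ((Int × Int) × List (Int × Int))) (vis : PySem.Set (Int × Int))
      (queue : List (Int × Int)) (parents : PySem.Dict (Int × Int) (Option (Int × Int)))
      (head : Nat),
      cola.map Prod.fst = queue.drop head →
      vis = parents.keys →
      parents.keys.Nodup →
      (∀ sp ∈ cola, pvEntry parents sp) →
      pvLoopA mapa objetivo fuel cola vis (head : Int) =
        pvLoopB mapa objetivo fuel queue parents (head : Int) := by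
  induction fuel with
  | zero => intro cola vis queue parents head _ _ _ _; rfl
  | succ fuel ih =>
    intro cola vis queue parents head hdrop hkeys hnd hent
    match cola, hent with
    | [], _ =>
      have hlen : queue.length ≤ head := List.drop_eq_nil_iff.mp (by
        rw [← hdrop]; rfl)
      show (none, (head : Int)) = pvLoopB mapa objetivo (fuel + 1) queue parents head
      simp only [pvLoopB]
      rw [if_neg (by omega)]
    | (s, p) :: rest, hent =>
      have hget : queue[head]? = some s := by
        rw [← List.head?_drop, ← hdrop]; rfl
      have hlt : head < queue.length := by
        by_contra hcon
        rw [List.getElem?_eq_none (by omega)] at hget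
        simp at hget
      have hestado : (PySem.List.pyGet? queue (head : Int)).getD ((0 : Int), (0 : Int)) = s := by
        rw [PySem.List.pyGet?_natCast, hget]; rfl
      obtain ⟨e1, e2, e3⟩ := hent (s, p) List.mem_cons_self
      simp only [pvLoopA, pvLoopB]
      rw [if_pos (show (head : Int) < (queue.length : Int) by exact_mod_cast hlt), hestado]
      by_cases hobj : s = objetivo
      · rw [if_pos hobj, if_pos hobj]
        obtain ⟨t, ht⟩ : ∃ t, p.reverse = s :: t := by
          cases hpr : p.reverse with
          | nil => rw [hpr] at e1; simp at e1
          | cons a t => rw [hpr] at e1; simp at e1; exact ⟨t, by rw [e1]⟩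
        have hsub : p ⊆ parents.keys := fun x hx =>
          pvChainRev_mem parents p.reverse e3 x (List.mem_reverse.mpr hx)
        have hbound : t.length + 1 ≤ parents.items.length + 1 := by
          have h1 : p.length ≤ parents.keys.length :=
            (List.subperm_of_subset e2 hsub).length_le
          have h2 : p.reverse.length = t.length + 1 := by rw [ht]; rfl
          have h3 : parents.keys.length = parents.items.length := by
            simp [PySem.Dict.keys]
          simp only [List.length_reverse] at h2
          omega
        rw [pvChainB_eval parents s t (ht ▸ e3) [] (parents.items.length + 1) hbound]
        rw [List.nil_append, ← ht, List.reverse_reverse]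
      · rw [if_neg hobj, if_neg hobj]
        rw [show vecinos s mapa = [(s.1 - 1, s.2), (s.1 + 1, s.2), (s.1, s.2 - 1),
          (s.1, s.2 + 1)].filter (pvEsLibre mapa) from rfl, List.foldl_filter]
        obtain ⟨hK', hdrop', hkeys', hnd', hent', -⟩ :=
          pvFold_pres mapa s p [(s.1 - 1, s.2), (s.1 + 1, s.2), (s.1, s.2 - 1), (s.1, s.2 + 1)]
            rest vis queue parents (head + 1) (by omega)
            (by
              have h1 : (queue.drop head).drop 1 = queue.drop (head + 1) := by
                rw [List.drop_drop]
              rw [← h1, ← hdrop]; rfl)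
            hkeys hnd (fun sp hm => hent sp (List.mem_cons_of_mem _ hm)) ⟨e1, e2, e3⟩
        have hcast : ((head : Int) + 1) = (((head + 1 : Nat)) : Int) := by push_cast; ring
        rw [hcast]
        exact ih _ _ _ _ (head + 1) hdrop' hkeys' hnd' hent' 

-- ===== VERDICT (by name: the statement is the Claim_ definition above) =====
theorem busqueda_anchura_spec : Claim_equal_busqueda_anchura := by
  intro mapa inicio objetivo _ _
  unfold Spec_busqueda_anchura busqueda_anchura busqueda_anchura_alt
  have hof : PySem.Dict.ofList [(inicio, (none : Option (Int × Int)))] =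
      PySem.Dict.mk [(inicio, none)] := rfl
  have h2 : PySem.Set.ofList [inicio] =
      (PySem.Dict.ofList [(inicio, (none : Option (Int × Int)))]).keys := by
    rw [hof]; rfl
  have h4 : ∀ sp ∈ [(inicio, [inicio])],
      pvEntry (PySem.Dict.ofList [(inicio, (none : Option (Int × Int)))]) sp := by
    intro sp hsp
    rcases List.mem_singleton.mp hsp with rfl
    refine ⟨by simp, by simp, ?_⟩
    show (PySem.Dict.ofList [(inicio, (none : Option (Int × Int)))]).get? inicio = some none
    rw [hof, PySem.Dict.get?_mk_cons]
    simp
  have h3 : (PySem.Dict.ofList [(inicio, (none : Option (Int × Int)))]).keys.Nodup := by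
    rw [hof]; simp
  have := pvLoop_eq mapa objetivo (mapa.length * mapa.length + 2)
    [(inicio, [inicio])] (PySem.Set.ofList [inicio]) [inicio]
    (PySem.Dict.ofList [(inicio, none)]) 0 (by simp) h2 h3 h4
  simpa using this
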